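-- pv_equiv track=rewrite | github.com/dhaugee/Snake_Game | hw07.py | mark_dna
-- ===== SOURCE A (Python) =====
-- def mark_dna(dna, seq):
--     '''
--     Purpose: To find and mark a specific dna sequence within
--     a longer one
--
--     Parameters: A DNA string and a smaller DNA sequence
--
--     Return Value: A string of DNA with arrows marking where
--     the smaller sequences are found
--     '''
--     final = ''
--     index = 0
--     while index < len(dna):
--         if dna[index:index+len(seq)] == seq:
--             final += ">>" + seq + "<<"
--             index += len(seq)
--         else:
--             final += dna[index:index+1]
--             index += 1
--     return final
-- ===== SOURCE B (Python) =====
-- def mark_dna(dna, seq):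
--     # Jump between occurrences with str.find instead of scanning char by char.
--     parts = []
--     mark = ">>" + seq + "<<"
--     rest = dna
--     while True:
--         j = rest.find(seq)
--         if j == -1:
--             parts.append(rest)
--             return "".join(parts)
--         parts.append(rest[:j])
--         parts.append(mark)
--         rest = rest[j + len(seq):]
-- ===== Notes on version B (the rewrite author's own statement) =====
-- stated objective: faster
-- what changed: Instead of testing a slice-equality at every index and appending one character at a time, B jumps directly from match to match with str.find and joins collected segments once at the end.
-- outside the precondition, e.g. on mark_dna('', ''): A returns '', B does not finish within the time limit
import Mathlib
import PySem

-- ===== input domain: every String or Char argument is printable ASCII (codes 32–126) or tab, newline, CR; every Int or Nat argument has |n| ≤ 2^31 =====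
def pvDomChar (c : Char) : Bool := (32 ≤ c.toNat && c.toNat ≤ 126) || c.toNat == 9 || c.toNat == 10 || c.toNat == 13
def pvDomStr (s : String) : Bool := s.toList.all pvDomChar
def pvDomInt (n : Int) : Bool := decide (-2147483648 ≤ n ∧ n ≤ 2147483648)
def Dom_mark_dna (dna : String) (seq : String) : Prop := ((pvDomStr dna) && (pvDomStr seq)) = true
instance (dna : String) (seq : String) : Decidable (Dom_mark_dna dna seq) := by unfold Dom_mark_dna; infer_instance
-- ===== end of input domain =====

-- B replaces A's per-index slice comparison and char-by-char concatenation by jumping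
-- from match to match with str.find, joining collected segments once (objective: faster).


-- ===== PORT A =====
-- A's while loop: fuel = len(dna) + 1 bounds the iteration count (inside Pre_ the index
-- strictly increases each step, so the fuel is never exhausted before the loop exits).
def markALoop (dna seq : List Char) : Nat → Nat → List Char → List Char
  | 0, _, final => final
  | f+1, index, final =>
    if index < dna.length then
      if PySem.List.slice dna (some (index : Int)) (some ((index : Int) + (seq.length : Int))) = seq then
        markALoop dna seq f (index + seq.length) (final ++ ((['>', '>'] ++ seq) ++ ['<', '<']))
      else
        markALoop dna seq f (index + 1) (final ++ PySem.List.slice dna (some (index : Int)) (some ((index : Int) + 1)))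
    else final

def mark_dna (dna : String) (seq : String) : String :=
  String.mk (markALoop dna.toList seq.toList (dna.toList.length + 1) 0 [])

-- ===== PORT B =====
-- B's while True loop: fuel = len(dna) + 1 (inside Pre_ each iteration strictly shrinks rest).
def markBLoop (seq mark : List Char) : Nat → List Char → List (List Char) → List (List Char)
  | 0, _, parts => parts
  | f+1, rest, parts =>
    let j := PySem.Chars.find rest seq
    if j = -1 then parts ++ [rest]
    else markBLoop seq mark f (PySem.List.slice rest (some (j + (seq.length : Int))) none)
           (parts ++ [PySem.List.slice rest none (some j), mark])

def mark_dna_alt (dna : String) (seq : String) : String :=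
  String.mk (PySem.Chars.join []
    (markBLoop seq.toList ((['>', '>'] ++ seq.toList) ++ ['<', '<'])
      (dna.toList.length + 1) dna.toList []))

-- ===== PRECONDITION & SPEC =====
-- Pre_ excludes seq = "": there A loops forever whenever dna ≠ "" (index += 0), and B's
-- own loop diverges too (find returns 0 and rest never shrinks) — including on ("", "")
-- where A happens to return "" (see cites).
def Pre_mark_dna (dna : String) (seq : String) : Prop := seq ≠ ""
instance (dna : String) (seq : String) : Decidable (Pre_mark_dna dna seq) := by unfold Pre_mark_dna; infer_instance
def pvWitness_mark_dna : String × String := ("ACGTAC", "AC")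
def Spec_mark_dna (dna : String) (seq : String) (out : String) : Prop := out = mark_dna_alt dna seq
instance (dna : String) (seq : String) (out : String) : Decidable (Spec_mark_dna dna seq out) := by unfold Spec_mark_dna; infer_instance

-- ===== CLAIM (what is proved, stated in full; the proofs are below) =====
def Claim_equal_mark_dna : Prop := ∀ (dna : String) (seq : String), Dom_mark_dna dna seq → Pre_mark_dna dna seq → Spec_mark_dna dna seq (mark_dna dna seq)

-- ===== LEMMAS AND PROOFS =====

-- The marker string ">>" + seq + "<<"
def pvMark (seq : List Char) : List Char := (['>', '>'] ++ seq) ++ ['<', '<']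

-- A's loop, rewritten over the remaining suffix of dna
def pvRun (seq : List Char) : Nat → List Char → List Char
  | 0, _ => []
  | f+1, s =>
    if s = [] then []
    else if seq <+: s then pvMark seq ++ pvRun seq f (s.drop seq.length)
    else s.take 1 ++ pvRun seq f (s.drop 1)

theorem pvRun_nil (seq : List Char) (f : Nat) : pvRun seq f [] = [] := by
  cases f <;> simp [pvRun]

theorem aLoop_eq (dna seq : List Char) :
    ∀ (f i : Nat) (final : List Char),
      markALoop dna seq f i final = final ++ pvRun seq f (dna.drop i) := by
  intro f
  induction f with
  | zero => intro i final; simp [markALoop, pvRun]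
  | succ f ih =>
    intro i final
    by_cases hi : i < dna.length
    · have hne : dna.drop i ≠ [] := by
        simp [List.drop_eq_nil_iff]; omega
      have hslice : PySem.List.slice dna (some (i : Int)) (some ((i : Int) + (seq.length : Int))) =
          (dna.drop i).take seq.length := PySem.List.slice_natCast_add dna i seq.length
      have hslice1 : PySem.List.slice dna (some (i : Int)) (some ((i : Int) + 1)) =
          (dna.drop i).take 1 := by
        have := PySem.List.slice_natCast_add dna i 1
        simpa using this
      by_cases hm : seq <+: dna.drop i
      · have heq : PySem.List.slice dna (some (i : Int)) (some ((i : Int) + (seq.length : Int))) = seq := by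
          rw [hslice]; exact (List.prefix_iff_eq_take.mp hm).symm
        rw [markALoop, if_pos hi, if_pos heq, ih]
        have hdd : dna.drop (i + seq.length) = (dna.drop i).drop seq.length := by
          rw [List.drop_drop, Nat.add_comm]
        rw [pvRun, if_neg hne, if_pos hm, hdd]
        simp [pvMark]
      · have hneq : PySem.List.slice dna (some (i : Int)) (some ((i : Int) + (seq.length : Int))) ≠ seq := by
          rw [hslice]
          intro h
          exact hm (List.prefix_iff_eq_take.mpr h.symm)
        rw [markALoop, if_pos hi, if_neg hneq, ih]
        have hdd : dna.drop (i + 1) = (dna.drop i).drop 1 := by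
          rw [List.drop_drop, Nat.add_comm]
        rw [pvRun, if_neg hne, if_neg hm, hdd, hslice1]
        simp
    · have hnil : dna.drop i = [] := by
        simp [List.drop_eq_nil_iff]; omega
      rw [markALoop, if_neg hi, hnil, pvRun_nil]
      simp

theorem bLoop_parts (seq mark : List Char) :
    ∀ (f : Nat) (rest : List Char) (parts : List (List Char)),
      markBLoop seq mark f rest parts = parts ++ markBLoop seq mark f rest [] := by
  intro f
  induction f with
  | zero => intro rest parts; simp [markBLoop]
  | succ f ih =>
    intro rest parts
    rw [markBLoop, markBLoop]
    by_cases hj : PySem.Chars.find rest seq = -1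
    · simp [hj]
    · simp only [hj, if_false]
      rw [ih _ (parts ++ _), ih _ ([] ++ _)]
      simp

theorem join_nil_flatten : ∀ (l : List (List Char)), PySem.Chars.join [] l = l.flatten := by
  intro l
  induction l with
  | nil => simp [PySem.Chars.join_nil]
  | cons a t ih =>
    cases t with
    | nil => simp [PySem.Chars.join_singleton]
    | cons b t' =>
      rw [PySem.Chars.join_cons_cons, ih]
      simp

-- A1: no occurrence anywhere → A's loop copies the string
theorem pvRun_no_match (seq : List Char) :
    ∀ (s : List Char) (f : Nat), ¬ seq <:+: s → s.length ≤ f → pvRun seq f s = s := by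
  intro s
  induction s with
  | nil => intro f _ _; exact pvRun_nil seq f
  | cons c t ih =>
    intro f hni hf
    obtain ⟨f', rfl⟩ : ∃ f', f = f' + 1 := ⟨f - 1, by simp at hf; omega⟩
    have hpre : ¬ seq <+: (c :: t) := fun h => hni h.isInfix
    rw [pvRun, if_neg (by simp), if_neg hpre]
    have hni' : ¬ seq <:+: t := fun h => hni (List.infix_cons h)
    have : pvRun seq f' t = t := ih f' hni' (by simp at hf; omega)
    simp [this]

-- A2: first match at position k → A's loop copies k chars, emits the marker, continues
theorem pvRun_match (seq : List Char) (hseq : seq ≠ []) :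
    ∀ (k : Nat) (s : List Char) (f : Nat),
      (∀ i < k, ¬ seq <+: s.drop i) → seq <+: s.drop k → k + 1 ≤ f →
      pvRun seq f s = s.take k ++ pvMark seq ++ pvRun seq (f - (k + 1)) (s.drop (k + seq.length)) := by
  intro k
  induction k with
  | zero =>
    intro s f _ hk hf
    obtain ⟨f', rfl⟩ : ∃ f', f = f' + 1 := ⟨f - 1, by omega⟩
    simp only [List.drop_zero] at hk
    have hsne : s ≠ [] := by
      intro h; subst h; exact hseq (List.prefix_nil.mp hk)
    rw [pvRun, if_neg hsne, if_pos hk]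
    simp
  | succ k ih =>
    intro s f hlt hk hf
    have hdne : s.drop (k + 1) ≠ [] := by
      intro h; rw [h] at hk; exact hseq (List.prefix_nil.mp hk)
    have hsne : s ≠ [] := by intro h; subst h; simp at hdne
    obtain ⟨c, t, rfl⟩ : ∃ c t, s = c :: t := by
      cases s with
      | nil => exact absurd rfl hsne
      | cons c t => exact ⟨c, t, rfl⟩
    obtain ⟨f', rfl⟩ : ∃ f', f = f' + 1 := ⟨f - 1, by omega⟩
    have h0 : ¬ seq <+: (c :: t) := by
      have := hlt 0 (by omega); simpa using this
    rw [pvRun, if_neg (by simp), if_neg h0]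
    have ht := ih t f'
      (fun i hi => by
        have := hlt (i + 1) (by omega)
        simpa using this)
      (by simpa using hk)
      (by omega)
    have hd : (c :: t).drop (k + 1 + seq.length) = t.drop (k + seq.length) := by
      have he : k + 1 + seq.length = (k + seq.length) + 1 := by omega
      rw [he, List.drop_succ_cons]
    have hfuel : f' + 1 - (k + 1 + 1) = f' - (k + 1) := by omega
    rw [hd, hfuel, List.drop_succ_cons, List.take_succ_cons]
    simp [ht]

-- main bridge: A's per-char loop equals B's find-jumping loop
theorem run_eq_bloop (seq : List Char) (hseq : seq ≠ []) :
    ∀ (n : Nat) (s : List Char) (f1 f2 : Nat), s.length ≤ n → s.length ≤ f1 → s.length < f2 →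
      pvRun seq f1 s = (markBLoop seq (pvMark seq) f2 s []).flatten := by
  intro n
  induction n with
  | zero =>
    intro s f1 f2 hn hf1 hf2
    have hs : s = [] := List.length_eq_zero_iff.mp (by omega)
    subst hs
    obtain ⟨f2', rfl⟩ : ∃ f2', f2 = f2' + 1 := ⟨f2 - 1, by omega⟩
    have hfind : PySem.Chars.find [] seq = -1 :=
      (PySem.Chars.find_eq_neg_one_iff _ _).mpr (by
        intro h
        exact hseq (List.infix_nil.mp h))
    rw [markBLoop]
    simp [hfind, pvRun_nil]
  | succ n ih =>
    intro s f1 f2 hn hf1 hf2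
    obtain ⟨f2', rfl⟩ : ∃ f2', f2 = f2' + 1 := ⟨f2 - 1, by omega⟩
    by_cases hj : PySem.Chars.find s seq = -1
    · have hni : ¬ seq <:+: s := (PySem.Chars.find_eq_neg_one_iff _ _).mp hj
      rw [markBLoop]
      simp only [hj]
      rw [pvRun_no_match seq s f1 hni hf1]
      simp
    · have hge : 0 ≤ PySem.Chars.find s seq := by
        have := PySem.Chars.neg_one_le_find s seq
        omega
      obtain ⟨hpre, hfirst⟩ := PySem.Chars.find_spec (s := s) (sub := seq) hge
      set j := PySem.Chars.find s seq with hjdef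
      set k := j.toNat with hkdef
      have hk_lt : k < s.length := by
        have hdne : s.drop k ≠ [] := by
          intro h; rw [h] at hpre; exact hseq (List.prefix_nil.mp hpre)
        by_contra h
        exact hdne (List.drop_eq_nil_iff.mpr (by omega))
      have hslice_to : PySem.List.slice s none (some j) = s.take k :=
        PySem.List.slice_to s hge
      have hslice_from : PySem.List.slice s (some (j + (seq.length : Int))) none = s.drop (k + seq.length) := by
        rw [PySem.List.slice_from s (by positivity)]
        congr 1
        omega
      have hm1 : 1 ≤ seq.length := by
        cases seq with
        | nil => exact absurd rfl hseq
        | cons _ _ => simp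
      rw [markBLoop]
      rw [if_neg hj]
      rw [bLoop_parts, hslice_to, hslice_from]
      rw [pvRun_match seq hseq k s f1 hfirst hpre (by omega)]
      have := ih (s.drop (k + seq.length)) (f1 - (k + 1)) f2'
        (by simp; omega) (by simp; omega) (by simp; omega)
      rw [this]
      simp

theorem toList_ne_nil_of_ne_empty (s : String) (h : s ≠ "") : s.toList ≠ [] := by
  intro hn
  apply h
  simpa using congrArg String.ofList hn

-- ===== VERDICT (by name: the statement is the Claim_ definition above) =====
theorem mark_dna_spec : Claim_equal_mark_dna := by
  intro dna seq _ hpre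
  unfold Spec_mark_dna mark_dna mark_dna_alt
  have hseq : seq.toList ≠ [] := toList_ne_nil_of_ne_empty seq hpre
  rw [aLoop_eq dna.toList seq.toList (dna.toList.length + 1) 0 []]
  rw [join_nil_flatten]
  simp only [List.drop_zero, List.nil_append]
  rw [run_eq_bloop seq.toList hseq dna.toList.length dna.toList (dna.toList.length + 1)
      (dna.toList.length + 1) (le_refl _) (by omega) (by omega)]
  simp [pvMark]
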